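-- pv_equiv track=rewrite | github.com/krishnangovindraj/typedb-kgqa | src/typedb_kgqa/fetch_schema.py | _build_compact_schema
-- ===== SOURCE A (Python) =====
-- def _build_compact_schema(
--     entities: list[str],
--     attributes: list[str],
--     relations: list[str],
--     owns: list[tuple[str, str]],
--     relates: list[tuple[str, str]],
--     plays: list[tuple[str, str]],
-- ) -> str:
--     """
--     Build a compact functional schema representation.
--
--     Format:
--         entity person has name|age|gender
--         relation parentage links (parent: person|..., child: person|...)
--     """
--     from collections import defaultdict
--
--     lines = []
--     # Output entities and relations
--     lines.append(f"$var isa { ' | '.join(sorted(entities + relations))};")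
--
--     # Group owns by owner: {owner: [attr1, attr2, ...]}
--     owns_by_owner = defaultdict(list)
--     for owner, attr in owns:
--         owns_by_owner[owner].append(attr)
--
--     # Group relates by relation: {relation: [role1, role2, ...]}
--     relates_by_rel = defaultdict(set)
--     for relation, role in relates:
--         relates_by_rel[relation].add(role)
--
--     # Group plays by role: {role: [player1, player2, ...]}
--     plays_by_role = defaultdict(set)
--     for player, role in plays:
--         plays_by_role[role].add(player)
--
--     # Output ownerships
--     lines.append("# Has")
--     for owner in sorted(entities + relations):
--         attrs = owns_by_owner.get(owner, [])
--         if attrs: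
--             lines.append(f"{owner} has {' | '.join(sorted(attrs))};")
--
--     lines.append("")
--     lines.append("# Links")
--
--     # Output links
--     for relation in sorted(relations):
--         roles = relates_by_rel.get(relation, [])
--         if roles:
--             role_parts = []
--             for role in sorted(roles):
--                 players = plays_by_role.get(role, [])
--                 if players:
--                     role_parts.append(f"{role}: {' | '.join(sorted(players))}")
--                 else:
--                     role_parts.append(role)
--             lines.append(f"{relation} links ({', '.join(role_parts)});")
--
--     return "\n".join(lines)
-- ===== SOURCE B (Python) =====
-- def _build_compact_schema(
--     entities: list[str],
--     attributes: list[str],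
--     relations: list[str],
--     owns: list[tuple[str, str]],
--     relates: list[tuple[str, str]],
--     plays: list[tuple[str, str]],
-- ) -> str:
--     """Build the compact schema text with inline filters instead of prebuilt
--     defaultdict indexes, assembling the lines with comprehensions."""
--     types = sorted(entities + relations)
--
--     def owned(t):
--         return sorted(a for o, a in owns if o == t)
--
--     def roles_of(rel):
--         return sorted({r for rl, r in relates if rl == rel})
--
--     def players_of(role):
--         return sorted({p for p, r in plays if r == role})
--
--     def role_part(role):
--         players = players_of(role)
--         return role if not players else f"{role}: {' | '.join(players)}"
--
--     has_lines = [f"{t} has {' | '.join(owned(t))};" for t in types if owned(t)]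
--     link_lines = [
--         f"{rel} links ({', '.join(role_part(r) for r in roles_of(rel))});"
--         for rel in sorted(relations)
--         if roles_of(rel)
--     ]
--     return "\n".join(
--         [f"$var isa {' | '.join(types)};", "# Has", *has_lines, "", "# Links", *link_lines]
--     )
-- ===== Notes on version B (the rewrite author's own statement) =====
-- stated objective: simpler
-- what changed: Drops the three defaultdict grouping passes: B computes each group on demand with an inline filter (sorted comprehension / set comprehension per type, relation and role) and assembles the output lines with list comprehensions instead of append loops.
import Mathlib
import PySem

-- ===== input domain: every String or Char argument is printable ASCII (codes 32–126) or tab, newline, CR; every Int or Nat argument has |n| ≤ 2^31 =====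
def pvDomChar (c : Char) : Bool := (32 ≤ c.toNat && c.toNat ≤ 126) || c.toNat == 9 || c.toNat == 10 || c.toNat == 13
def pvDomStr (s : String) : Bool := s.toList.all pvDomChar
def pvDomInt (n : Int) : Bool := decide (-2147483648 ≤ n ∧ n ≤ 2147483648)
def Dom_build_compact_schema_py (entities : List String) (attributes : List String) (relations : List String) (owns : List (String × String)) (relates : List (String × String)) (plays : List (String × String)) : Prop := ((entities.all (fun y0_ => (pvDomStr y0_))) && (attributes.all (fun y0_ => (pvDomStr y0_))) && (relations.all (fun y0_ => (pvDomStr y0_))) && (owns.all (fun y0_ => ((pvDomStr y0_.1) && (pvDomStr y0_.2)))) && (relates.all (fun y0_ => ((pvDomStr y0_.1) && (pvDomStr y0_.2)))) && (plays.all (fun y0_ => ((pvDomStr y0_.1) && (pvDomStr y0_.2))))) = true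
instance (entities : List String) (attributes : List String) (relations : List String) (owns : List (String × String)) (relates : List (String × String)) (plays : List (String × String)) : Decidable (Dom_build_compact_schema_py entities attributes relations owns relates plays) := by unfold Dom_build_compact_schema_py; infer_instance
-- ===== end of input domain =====

-- B replaces A's three defaultdict grouping passes by on-demand inline filters and
-- builds the output lines with comprehensions (objective: simpler; same output).

-- ===== PORT A =====
def build_compact_schema_py (entities : List String) (attributes : List String) (relations : List String) (owns : List (String × String)) (relates : List (String × String)) (plays : List (String × String)) : String :=
  let lines : List String := []
  let lines := lines ++ ["$var isa " ++ PySem.Str.join " | " (PySem.List.sorted (entities ++ relations) (fun x => x) false) ++ ";"]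
  -- owns_by_owner = defaultdict(list); owns_by_owner[owner].append(attr)
  let owns_by_owner := owns.foldl (fun d p => d.modify p.1 [] (· ++ [p.2])) PySem.Dict.empty
  -- relates_by_rel = defaultdict(set); relates_by_rel[relation].add(role)
  let relates_by_rel := relates.foldl (fun d p => d.modify p.1 PySem.Set.empty (fun s => PySem.Set.add s p.2)) PySem.Dict.empty
  -- plays_by_role = defaultdict(set); plays_by_role[role].add(player)
  let plays_by_role := plays.foldl (fun d p => d.modify p.2 PySem.Set.empty (fun s => PySem.Set.add s p.1)) PySem.Dict.empty
  let lines := lines ++ ["# Has"]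
  let lines := (PySem.List.sorted (entities ++ relations) (fun x => x) false).foldl (fun ls owner =>
      let attrs := owns_by_owner.getD owner []
      if attrs ≠ [] then
        ls ++ [owner ++ " has " ++ PySem.Str.join " | " (PySem.List.sorted attrs (fun x => x) false) ++ ";"]
      else ls) lines
  let lines := lines ++ [""]
  let lines := lines ++ ["# Links"]
  let lines := (PySem.List.sorted relations (fun x => x) false).foldl (fun ls relation =>
      let roles := relates_by_rel.getD relation PySem.Set.empty
      if roles ≠ [] then
        let role_parts := (PySem.List.sorted roles (fun x => x) false).foldl (fun ps role =>
            let players := plays_by_role.getD role PySem.Set.empty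
            if players ≠ [] then
              ps ++ [role ++ ": " ++ PySem.Str.join " | " (PySem.List.sorted players (fun x => x) false)]
            else
              ps ++ [role]) []
        ls ++ [relation ++ " links (" ++ PySem.Str.join ", " role_parts ++ ");"]
      else ls) lines
  PySem.Str.join "\n" lines

-- ===== PORT B =====
-- sorted(a for o, a in owns if o == t)
def bcsOwned (owns : List (String × String)) (t : String) : List String :=
  PySem.List.sorted ((owns.filter (fun p => p.1 == t)).map (·.2)) (fun x => x) false

-- sorted({r for rl, r in relates if rl == rel})
def bcsRolesOf (relates : List (String × String)) (rel : String) : List String :=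
  PySem.List.sorted (PySem.Set.ofList ((relates.filter (fun p => p.1 == rel)).map (·.2))) (fun x => x) false

-- sorted({p for p, r in plays if r == role})
def bcsPlayersOf (plays : List (String × String)) (role : String) : List String :=
  PySem.List.sorted (PySem.Set.ofList ((plays.filter (fun p => p.2 == role)).map (·.1))) (fun x => x) false

def bcsRolePart (plays : List (String × String)) (role : String) : String :=
  let players := bcsPlayersOf plays role
  if players = [] then role else role ++ ": " ++ PySem.Str.join " | " players

def build_compact_schema_py_alt (entities : List String) (attributes : List String) (relations : List String) (owns : List (String × String)) (relates : List (String × String)) (plays : List (String × String)) : String :=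
  let types := PySem.List.sorted (entities ++ relations) (fun x => x) false
  let has_lines := (types.filter (fun t => bcsOwned owns t ≠ [])).map
      (fun t => t ++ " has " ++ PySem.Str.join " | " (bcsOwned owns t) ++ ";")
  let link_lines := ((PySem.List.sorted relations (fun x => x) false).filter (fun rel => bcsRolesOf relates rel ≠ [])).map
      (fun rel => rel ++ " links (" ++ PySem.Str.join ", " ((bcsRolesOf relates rel).map (bcsRolePart plays)) ++ ");")
  PySem.Str.join "\n"
    (["$var isa " ++ PySem.Str.join " | " types ++ ";", "# Has"] ++ has_lines ++ ["", "# Links"] ++ link_lines)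

-- ===== PRECONDITION & SPEC =====
def Spec_build_compact_schema_py (entities : List String) (attributes : List String) (relations : List String) (owns : List (String × String)) (relates : List (String × String)) (plays : List (String × String)) (out : String) : Prop := out = build_compact_schema_py_alt entities attributes relations owns relates plays
instance (entities : List String) (attributes : List String) (relations : List String) (owns : List (String × String)) (relates : List (String × String)) (plays : List (String × String)) (out : String) : Decidable (Spec_build_compact_schema_py entities attributes relations owns relates plays out) := by unfold Spec_build_compact_schema_py; infer_instance

-- ===== CLAIM (what is proved, stated in full; the proofs are below) =====
def Claim_equal_build_compact_schema_py : Prop := ∀ (entities : List String) (attributes : List String) (relations : List String) (owns : List (String × String)) (relates : List (String × String)) (plays : List (String × String)), Dom_build_compact_schema_py entities attributes relations owns relates plays → Spec_build_compact_schema_py entities attributes relations owns relates plays (build_compact_schema_py entities attributes relations owns relates plays)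

-- ===== LEMMAS AND PROOFS =====

-- A's list-valued defaultdict at key t holds exactly the attrs of pairs with first component t, in order.
theorem ownsDict_getD (owns : List (String × String)) (t : String) :
    (owns.foldl (fun d p => d.modify p.1 [] (· ++ [p.2])) PySem.Dict.empty).getD t []
      = (owns.filter (fun p => p.1 == t)).map (·.2) := by
  rw [PySem.Dict.getD_foldl_modify_append]
  simp [PySem.Dict.getD_empty]

-- generic: a set-valued grouping loop, keyed/valued by arbitrary projections
theorem setDict_getD (l : List (String × String)) (key val : String × String → String)
    (d : PySem.Dict String (PySem.Set String)) (k : String) :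
    (l.foldl (fun d p => d.modify (key p) PySem.Set.empty (fun s => PySem.Set.add s (val p))) d).getD k PySem.Set.empty
      = ((l.filter (fun p => key p == k)).map val).foldl PySem.Set.add (d.getD k PySem.Set.empty) := by
  induction l generalizing d with
  | nil => simp
  | cons p rest ih =>
    simp only [List.foldl_cons, ih, List.filter_cons, PySem.Dict.getD_modify]
    by_cases h : k = key p
    · subst h
      simp
    · have h2 : ¬ (key p = k) := fun hk => h hk.symm
      simp [beq_iff_eq, h, h2]

theorem relatesDict_getD (relates : List (String × String)) (rel : String) :
    (relates.foldl (fun d p => d.modify p.1 PySem.Set.empty (fun s => PySem.Set.add s p.2)) PySem.Dict.empty).getD rel PySem.Set.empty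
      = PySem.Set.ofList ((relates.filter (fun p => p.1 == rel)).map (·.2)) := by
  rw [setDict_getD relates (·.1) (·.2)]
  simp [PySem.Dict.getD_empty, PySem.Set.ofList_eq_foldl]

theorem playsDict_getD (plays : List (String × String)) (role : String) :
    (plays.foldl (fun d p => d.modify p.2 PySem.Set.empty (fun s => PySem.Set.add s p.1)) PySem.Dict.empty).getD role PySem.Set.empty
      = PySem.Set.ofList ((plays.filter (fun p => p.2 == role)).map (·.1)) := by
  rw [setDict_getD plays (·.2) (·.1)]
  simp [PySem.Dict.getD_empty, PySem.Set.ofList_eq_foldl]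

-- a loop that appends exactly one element per iteration, chosen by a test, is a map
theorem foldl_append_ite_pair {α β : Type} (p : α → Prop) [DecidablePred p] (f g : α → β)
    (l : List α) (acc : List β) :
    l.foldl (fun acc x => if p x then acc ++ [f x] else acc ++ [g x]) acc
      = acc ++ l.map (fun x => if p x then f x else g x) := by
  induction l generalizing acc with
  | nil => simp
  | cons x rest ih => by_cases h : p x <;> simp [h, ih]

theorem bcsRolePart_eq (plays : List (String × String)) :
    bcsRolePart plays = fun role =>
      if bcsPlayersOf plays role = [] then role
      else role ++ ": " ++ PySem.Str.join " | " (bcsPlayersOf plays role) := rfl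

-- ===== VERDICT (by name: the statement is the Claim_ definition above) =====
theorem build_compact_schema_py_spec : Claim_equal_build_compact_schema_py := by
  intro entities attributes relations owns relates plays _
  unfold Spec_build_compact_schema_py
  unfold build_compact_schema_py build_compact_schema_py_alt
  simp only [ownsDict_getD, relatesDict_getD, playsDict_getD]
  simp only [PySem.List.foldl_append_ite, foldl_append_ite_pair]
  simp only [bcsRolePart_eq, bcsOwned, bcsRolesOf, bcsPlayersOf,
    PySem.List.sorted_eq_nil_iff, ne_eq, ite_not,
    List.nil_append, List.append_assoc, List.cons_append]
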